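-- pv_equiv track=rewrite | github.com/AI-agent-team-2/data-science- | app/context.py | _compute_fallback_reason
-- ===== SOURCE A (Python) =====
-- def _compute_fallback_reason(source: str, attempted_sources: list[str], source_status_map: dict[str, str]) -> str:
--     """Кратко объясняет, почему был выбран текущий источник."""
--     if not attempted_sources or attempted_sources[0] == source:
--         return "primary_source_succeeded"
--
--     previous = attempted_sources[:-1]
--     previous_statuses = [source_status_map.get(item, "unknown") for item in previous]
--     if any(status == "failed" for status in previous_statuses):
--         return "fallback_after_source_failure"
--     if any(status == "empty" for status in previous_statuses):
--         return "fallback_after_empty_result"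
--     return "fallback_after_skipped_source"
-- ===== SOURCE B (Python) =====
-- _SEVERITY = {"failed": 2, "empty": 1}
-- _REASONS = ["fallback_after_skipped_source", "fallback_after_empty_result", "fallback_after_source_failure"]
--
-- def _compute_fallback_reason(source: str, attempted_sources: list[str], source_status_map: dict[str, str]) -> str:
--     """Arithmetical formulation: map each previous attempt to a numeric severity
--     (failed=2, empty=1, anything else 0), take the maximum, and index a reason table."""
--     if not attempted_sources or attempted_sources[0] == source:
--         return "primary_source_succeeded"
--     sev = max((_SEVERITY.get(source_status_map.get(item, "unknown"), 0)
--                for item in attempted_sources[:-1]), default=0)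
--     return _REASONS[sev]
-- ===== Notes on version B (the rewrite author's own statement) =====
-- stated objective: alternative
-- what changed: Replaces the status-list + two any() boolean scans and early-return chain with an arithmetical formulation: each previous attempt is mapped to a numeric severity (failed=2, empty=1, else 0), the maximum severity is taken, and the answer is a table lookup indexed by that maximum.
import Mathlib
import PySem

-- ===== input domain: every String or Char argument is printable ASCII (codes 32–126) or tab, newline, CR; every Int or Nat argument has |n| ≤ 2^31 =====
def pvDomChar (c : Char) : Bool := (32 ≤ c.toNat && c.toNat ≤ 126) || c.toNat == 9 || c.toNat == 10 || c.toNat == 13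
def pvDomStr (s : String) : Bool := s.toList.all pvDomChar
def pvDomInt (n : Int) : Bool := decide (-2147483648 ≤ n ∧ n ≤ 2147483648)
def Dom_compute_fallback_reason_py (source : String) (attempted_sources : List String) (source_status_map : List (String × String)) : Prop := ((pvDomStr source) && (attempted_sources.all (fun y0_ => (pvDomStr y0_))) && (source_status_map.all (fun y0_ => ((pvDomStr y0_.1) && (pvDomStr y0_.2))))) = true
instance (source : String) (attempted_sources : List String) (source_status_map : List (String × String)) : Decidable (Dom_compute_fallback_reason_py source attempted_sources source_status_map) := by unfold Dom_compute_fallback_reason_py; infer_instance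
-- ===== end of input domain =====

-- B replaces the status list + two any() scans with a numeric severity maximum and a reason-table lookup (objective: alternative).


-- ===== PORT A =====
def compute_fallback_reason_py (source : String) (attempted_sources : List String) (source_status_map : List (String × String)) : String :=
  match attempted_sources with
  | [] => "primary_source_succeeded"
  | first :: _ =>
    if first = source then "primary_source_succeeded"
    else
      let previous := PySem.List.slice attempted_sources none (some (-1))
      let previous_statuses := previous.map (fun item => PySem.Dict.getD (PySem.Dict.mk source_status_map) item "unknown")
      if previous_statuses.any (fun status => status == "failed") then "fallback_after_source_failure"
      else if previous_statuses.any (fun status => status == "empty") then "fallback_after_empty_result"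
      else "fallback_after_skipped_source"

-- ===== PORT B =====
-- module-level severity table of Source B
def pvSeverity : PySem.Dict String Int := PySem.Dict.mk [("failed", 2), ("empty", 1)]
-- module-level reason table of Source B
def pvReasons : List String := ["fallback_after_skipped_source", "fallback_after_empty_result", "fallback_after_source_failure"]

def compute_fallback_reason_py_alt (source : String) (attempted_sources : List String) (source_status_map : List (String × String)) : String :=
  match attempted_sources with
  | [] => "primary_source_succeeded"
  | first :: _ =>
    if first = source then "primary_source_succeeded"
    else
      -- max(..., default=0) over the mapped severities, as a fold with initial 0
      let sev := (PySem.List.slice attempted_sources none (some (-1))).foldl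
        (fun (acc : Int) item =>
          max acc (PySem.Dict.getD pvSeverity (PySem.Dict.getD (PySem.Dict.mk source_status_map) item "unknown") 0)) 0
      -- list index _REASONS[sev]; sev is always 0, 1 or 2, the getD "" only totalizes
      (PySem.List.pyGet? pvReasons sev).getD ""

-- ===== PRECONDITION & SPEC =====
def Spec_compute_fallback_reason_py (source : String) (attempted_sources : List String) (source_status_map : List (String × String)) (out : String) : Prop := out = compute_fallback_reason_py_alt source attempted_sources source_status_map
instance (source : String) (attempted_sources : List String) (source_status_map : List (String × String)) (out : String) : Decidable (Spec_compute_fallback_reason_py source attempted_sources source_status_map out) := by unfold Spec_compute_fallback_reason_py; infer_instance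

-- ===== CLAIM (what is proved, stated in full; the proofs are below) =====
def Claim_equal_compute_fallback_reason_py : Prop := ∀ (source : String) (attempted_sources : List String) (source_status_map : List (String × String)), Dom_compute_fallback_reason_py source attempted_sources source_status_map → Spec_compute_fallback_reason_py source attempted_sources source_status_map (compute_fallback_reason_py source attempted_sources source_status_map)

-- ===== LEMMAS AND PROOFS =====
-- severity of one item
def pvSev (m : List (String × String)) (item : String) : Int :=
  PySem.Dict.getD pvSeverity (PySem.Dict.getD (PySem.Dict.mk m) item "unknown") 0

lemma sevTable_char (s : String) :
    PySem.Dict.getD pvSeverity s 0 = (if s = "failed" then 2 else if s = "empty" then 1 else 0) := by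
  by_cases hf : s = "failed"
  · subst hf; decide
  · by_cases he : s = "empty"
    · subst he; decide
    · have h1 : (("failed" : String) == s) = false := by
        simp only [beq_eq_false_iff_ne, ne_eq]; exact fun h => hf h.symm
      have h2 : (("empty" : String) == s) = false := by
        simp only [beq_eq_false_iff_ne, ne_eq]; exact fun h => he h.symm
      simp [pvSeverity, PySem.Dict.getD, PySem.Dict.get?, List.find?, h1, h2, hf, he]

lemma pvSev_char (m : List (String × String)) (item : String) :
    pvSev m item = (if PySem.Dict.getD (PySem.Dict.mk m) item "unknown" = "failed" then 2
      else if PySem.Dict.getD (PySem.Dict.mk m) item "unknown" = "empty" then 1 else 0) := by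
  unfold pvSev; exact sevTable_char _

-- characterisation of the max-fold: 2 if some previous item failed, else lifted by 1 if some was empty
lemma foldl_max_sev (m : List (String × String)) :
    ∀ (l : List String) (a : Int), 0 ≤ a → a ≤ 2 →
    l.foldl (fun (acc : Int) item => max acc (pvSev m item)) a
    = (if l.any (fun i => PySem.Dict.getD (PySem.Dict.mk m) i "unknown" == "failed") then 2
       else if l.any (fun i => PySem.Dict.getD (PySem.Dict.mk m) i "unknown" == "empty") then max a 1
       else a) := by
  intro l
  induction l with
  | nil => intro a _ _; simp
  | cons x xs ih =>
    intro a h0 h2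
    simp only [List.foldl_cons, List.any_cons]
    rw [pvSev_char]
    by_cases hf : PySem.Dict.getD (PySem.Dict.mk m) x "unknown" = "failed"
    · rw [if_pos hf, ih (max a 2) (by omega) (by omega)]
      simp only [hf, beq_self_eq_true, Bool.true_or, if_true]
      split_ifs <;> omega
    · by_cases he : PySem.Dict.getD (PySem.Dict.mk m) x "unknown" = "empty"
      · rw [if_neg hf, if_pos he, ih (max a 1) (by omega) (by omega)]
        simp only [he]
        by_cases hxf : (xs.any fun i => PySem.Dict.getD (PySem.Dict.mk m) i "unknown" == "failed") = true
        · simp [hxf]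
        · simp [hxf]
      · rw [if_neg hf, if_neg he]
        have hf' : (PySem.Dict.getD (PySem.Dict.mk m) x "unknown" == "failed") = false := by simp [hf]
        have he' : (PySem.Dict.getD (PySem.Dict.mk m) x "unknown" == "empty") = false := by simp [he]
        simp only [show (max a 0) = a by omega]
        rw [ih a h0 h2]
        simp only [hf', he', Bool.false_or]

-- ===== VERDICT (by name: the statement is the Claim_ definition above) =====
theorem compute_fallback_reason_py_spec : Claim_equal_compute_fallback_reason_py := by
  intro source attempted_sources source_status_map _
  unfold Spec_compute_fallback_reason_py compute_fallback_reason_py compute_fallback_reason_py_alt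
  cases attempted_sources with
  | nil => rfl
  | cons first rest =>
    simp only
    by_cases h : first = source
    · simp [h]
    · simp only [h]
      have := foldl_max_sev source_status_map
        (PySem.List.slice (first :: rest) none (some (-1))) 0 (by omega) (by omega)
      simp only [pvSev] at this
      rw [this]
      by_cases hf : (PySem.List.slice (first :: rest) none (some (-1))).any
          (fun i => PySem.Dict.getD (PySem.Dict.mk source_status_map) i "unknown" == "failed")
      · simp [hf, List.any_map, Function.comp_def, PySem.List.pyGet?, PySem.List.pyIdx?, pvReasons]
      · by_cases he : (PySem.List.slice (first :: rest) none (some (-1))).any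
            (fun i => PySem.Dict.getD (PySem.Dict.mk source_status_map) i "unknown" == "empty")
        · simp [hf, he, List.any_map, Function.comp_def, PySem.List.pyGet?, PySem.List.pyIdx?, pvReasons]
        · simp [hf, he, List.any_map, Function.comp_def, PySem.List.pyGet?, PySem.List.pyIdx?, pvReasons]
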